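-- pv_equiv track=rewrite | github.com/jjimini98/PythonAlgorithm | 6.Dynamic Programming/개미전사.py | solution
-- ===== SOURCE A (Python) =====
-- def solution(len_list,lis):
--     max_value = 0
--     for i in range(len_list):
--         try:
--             for j in range(i+2, len_list):
--                 max_value = max(max_value , lis[i] + lis[j])
--         except:
--             continue
--
--     return max_value
-- ===== SOURCE B (Python) =====
-- def solution(len_list, lis):
--     # single pass: for each j, best partner i<=j-2 is the prefix max of lis[:j-1]
--     n = max(min(len_list, len(lis)), 0)
--     best = 0
--     pref = None
--     for x, y in zip(lis[:n-2], lis[2:n]):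
--         if pref is None or x > pref:
--             pref = x
--         if pref + y > best:
--             best = pref + y
--     return best
-- ===== Notes on version B (the rewrite author's own statement) =====
-- stated objective: faster
-- what changed: replaced the O(n^2) double loop over all pairs (i, j>=i+2) by a single pass over j that maintains the running prefix maximum of lis[i] for i<=j-2
import Mathlib
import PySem

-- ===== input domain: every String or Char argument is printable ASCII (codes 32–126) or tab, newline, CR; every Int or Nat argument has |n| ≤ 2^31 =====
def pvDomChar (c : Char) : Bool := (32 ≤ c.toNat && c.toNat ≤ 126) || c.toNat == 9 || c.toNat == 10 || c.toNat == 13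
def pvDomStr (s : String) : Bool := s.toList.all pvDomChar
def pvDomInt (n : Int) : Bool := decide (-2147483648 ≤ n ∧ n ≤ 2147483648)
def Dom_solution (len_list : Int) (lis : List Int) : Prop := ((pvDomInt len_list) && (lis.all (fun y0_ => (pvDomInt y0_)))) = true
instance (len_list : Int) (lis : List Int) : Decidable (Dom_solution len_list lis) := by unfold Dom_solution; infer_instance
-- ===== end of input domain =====

-- B replaces A's O(n^2) double loop over pairs (i, j>=i+2) by a single pass over j
-- maintaining the prefix maximum of lis[i] for i<=j-2 (objective: faster).

-- ===== PORT A =====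
-- inner 'for j' loop; the try/except makes the first IndexError abandon the row
def solnInner (lis : List Int) (i : Int) : Int → List Int → Int
  | mv, [] => mv
  | mv, j :: js =>
    match PySem.List.pyGet? lis i, PySem.List.pyGet? lis j with
    | some a, some b => solnInner lis i (max mv (a + b)) js
    | _, _ => mv

def solution (len_list : Int) (lis : List Int) : Int :=
  (PySem.List.pyRange 0 len_list 1).foldl
    (fun mv i => solnInner lis i mv (PySem.List.pyRange (i + 2) len_list 1)) 0

-- ===== PORT B =====
def solution_alt (len_list : Int) (lis : List Int) : Int :=
  let n : Int := max (min len_list (lis.length : Int)) 0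
  let pairs := (PySem.List.slice lis none (some (n - 2))).zip
               (PySem.List.slice lis (some 2) (some n))
  (pairs.foldl (fun (st : Int × Option Int) (xy : Int × Int) =>
      let p : Int := match st.2 with
        | none => xy.1
        | some p0 => if xy.1 > p0 then xy.1 else p0
      (if p + xy.2 > st.1 then p + xy.2 else st.1, some p))
    ((0 : Int), (none : Option Int))).1

-- ===== PRECONDITION & SPEC =====
def Spec_solution (len_list : Int) (lis : List Int) (out : Int) : Prop := out = solution_alt len_list lis
instance (len_list : Int) (lis : List Int) (out : Int) : Decidable (Spec_solution len_list lis out) := by unfold Spec_solution; infer_instance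

-- ===== CLAIM (what is proved, stated in full; the proofs are below) =====
def Claim_equal_solution : Prop := ∀ (len_list : Int) (lis : List Int), Dom_solution len_list lis → Spec_solution len_list lis (solution len_list lis)

-- ===== LEMMAS AND PROOFS =====

-- index read with default, Int index (all indices in play are ≥ 0)
def gI (lis : List Int) (k : Int) : Int := lis.getD k.toNat 0

-- the effective bound: pairs (i, j) contribute iff i+2 ≤ j < min len_list (len lis)
def effN (len_list : Int) (lis : List Int) : Int := max (min len_list (lis.length : Int)) 0

-- the list of all pair sums A inspects, grouped by i (A's traversal order)
def rowL (lis : List Int) (N i : Int) : List Int :=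
  (PySem.List.pyRange (i + 2) N 1).map (fun j => gI lis i + gI lis j)

def allL (lis : List Int) (N : Int) : List Int :=
  (PySem.List.pyRange 0 N 1).flatMap (rowL lis N)

-- prefix maximum of lis[0..t]
def prefmax (lis : List Int) : ℕ → Int
  | 0 => gI lis 0
  | t + 1 => max (prefmax lis t) (gI lis (t + 1))

-- the list of candidate sums B inspects, indexed by t = j - 2 (B's traversal order)
def bsums (lis : List Int) (k : ℕ) : List Int :=
  (List.range k).map (fun t => prefmax lis t + gI lis (t + 2))

-- ---- generic foldl-max lemmas ----

theorem le_foldl_max (l : List Int) (a : Int) : a ≤ l.foldl max a := by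
  induction l generalizing a with
  | nil => simp
  | cons x xs ih => exact le_trans (le_max_left a x) (ih _)

theorem mem_le_foldl_max (l : List Int) (a x : Int) (hx : x ∈ l) : x ≤ l.foldl max a := by
  induction l generalizing a with
  | nil => simp at hx
  | cons y ys ih =>
    rcases List.mem_cons.mp hx with h | h
    · subst h; exact le_trans (le_max_right a x) (le_foldl_max _ _)
    · exact ih _ h

theorem foldl_max_le (l : List Int) (a c : Int) (ha : a ≤ c) (h : ∀ x ∈ l, x ≤ c) :
    l.foldl max a ≤ c := by
  induction l generalizing a with
  | nil => simpa using ha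
  | cons y ys ih =>
    exact ih _ (max_le ha (h y (List.mem_cons_self))) (fun x hx => h x (List.mem_cons_of_mem _ hx))

-- ---- A-side reduction ----

theorem solnInner_none (lis : List Int) (i : Int) (mv : Int) (js : List Int)
    (h : PySem.List.pyGet? lis i = none) : solnInner lis i mv js = mv := by
  cases js with
  | nil => rfl
  | cons j js => simp [solnInner, h]

theorem solnInner_some (lis : List Int) (i x : Int)
    (hx : PySem.List.pyGet? lis i = some x) :
    ∀ (fuel : ℕ) (mv a b : Int), 0 ≤ a → (b - a).toNat ≤ fuel →
    solnInner lis i mv (PySem.List.pyRange a b 1) =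
      (PySem.List.pyRange a (min b (lis.length : Int)) 1).foldl
        (fun mv j => max mv (x + gI lis j)) mv := by
  intro fuel
  induction fuel with
  | zero =>
    intro mv a b ha hf
    have hba : b ≤ a := by omega
    rw [PySem.List.pyRange_one_eq_nil hba,
      PySem.List.pyRange_one_eq_nil (le_trans (min_le_left _ _) hba)]
    rfl
  | succ fuel ih =>
    intro mv a b ha hf
    by_cases hab : b ≤ a
    · rw [PySem.List.pyRange_one_eq_nil hab,
        PySem.List.pyRange_one_eq_nil (le_trans (min_le_left _ _) hab)]
      rfl
    · have hab' : a < b := by omega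
      rw [PySem.List.pyRange_one_cons hab']
      by_cases hlen : a < (lis.length : Int)
      · have hget : PySem.List.pyGet? lis a = some (gI lis a) := by
          rw [PySem.List.pyGet?_of_nonneg lis ha]
          have hlt : a.toNat < lis.length := by omega
          rw [List.getElem?_eq_getElem hlt]
          simp [gI, List.getD_eq_getElem?_getD, List.getElem?_eq_getElem hlt]
        have hmin : a < min b (lis.length : Int) := lt_min hab' hlen
        rw [PySem.List.pyRange_one_cons hmin]
        simp only [solnInner, hx, hget, List.foldl_cons]
        exact ih (max mv (x + gI lis a)) (a + 1) b (by omega) (by omega)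
      · have hget : PySem.List.pyGet? lis a = none := by
          rw [PySem.List.pyGet?_eq_none_iff lis a]
          simp only [PySem.Raise.InRange]
          omega
        have hmin : min b (lis.length : Int) ≤ a := le_trans (min_le_right _ _) (by omega)
        rw [PySem.List.pyRange_one_eq_nil hmin]
        simp [solnInner, hx, hget]

theorem foldl_const {α : Type} (l : List α) (f : Int → α → Int) (a : Int)
    (h : ∀ x ∈ l, ∀ b, f b x = b) : l.foldl f a = a := by
  induction l generalizing a with
  | nil => rfl
  | cons y ys ih =>
    rw [List.foldl_cons, h y (List.mem_cons_self) a]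
    exact ih a (fun x hx b => h x (List.mem_cons_of_mem _ hx) b)

theorem foldl_max_flatMap {α : Type} (l : List α) (f : α → List Int) (a : Int) :
    (l.flatMap f).foldl max a = l.foldl (fun acc x => (f x).foldl max acc) a := by
  induction l generalizing a with
  | nil => rfl
  | cons y ys ih => rw [List.flatMap_cons, List.foldl_append, List.foldl_cons, ih]

theorem pyGet?_gI (lis : List Int) (i : Int) (h0 : 0 ≤ i) (h1 : i < (lis.length : Int)) :
    PySem.List.pyGet? lis i = some (gI lis i) := by
  rw [PySem.List.pyGet?_eq_some_getElem lis h0 h1]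
  have hlt : i.toNat < lis.length := by omega
  simp [gI, List.getD_eq_getElem?_getD, List.getElem?_eq_getElem hlt]

theorem A_eq (len_list : Int) (lis : List Int) :
    solution len_list lis = (allL lis (effN len_list lis)).foldl max 0 := by
  by_cases h0 : len_list ≤ 0
  · have hN : effN len_list lis = 0 := by
      have : (0 : Int) ≤ (lis.length : Int) := by positivity
      simp only [effN]
      omega
    rw [hN]
    simp only [solution, allL,
      PySem.List.pyRange_one_eq_nil h0, PySem.List.pyRange_one_eq_nil (le_refl (0 : Int))]
    rfl
  · have hL : (0 : Int) ≤ (lis.length : Int) := by positivity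
    set N : Int := min len_list (lis.length : Int) with hNdef
    have hN : effN len_list lis = N := by simp only [effN]; omega
    have hN0 : 0 ≤ N := by omega
    have hNl : N ≤ len_list := min_le_left _ _
    rw [hN]
    unfold solution
    rw [PySem.List.pyRange_one_append 0 N len_list hN0 hNl, List.foldl_append]
    rw [foldl_const (PySem.List.pyRange N len_list) _ _ (by
      intro x hx b
      rw [PySem.List.mem_pyRange_one] at hx
      have hxe : PySem.List.pyGet? lis x = none := by
        rw [PySem.List.pyGet?_eq_none_iff lis x]
        simp only [PySem.Raise.InRange]
        omega
      exact solnInner_none lis x b _ hxe)]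
    rw [allL, foldl_max_flatMap]
    apply PySem.List.foldl_congr_mem
    intro acc i hi
    rw [PySem.List.mem_pyRange_one] at hi
    have hiL : i < (lis.length : Int) := by omega
    rw [solnInner_some lis i (gI lis i) (pyGet?_gI lis i hi.1 hiL)
      (len_list - (i + 2)).toNat acc (i + 2) len_list (by omega) (le_refl _)]
    have hmin : min len_list (lis.length : Int) = N := rfl
    rw [hmin, rowL, List.foldl_map]

-- ---- B-side reduction ----

theorem if_gt_eq_max (a b : Int) : (if b > a then b else a) = max a b := by
  split_ifs with h
  · exact (max_eq_right h.le).symm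
  · exact (max_eq_left (not_lt.mp h)).symm

theorem bloop (lis : List Int) (k : ℕ) :
    ((List.range (k + 1)).map (fun t => (lis.getD t 0, lis.getD (t + 2) 0))).foldl
      (fun (st : Int × Option Int) (xy : Int × Int) =>
        let p : Int := match st.2 with
          | none => xy.1
          | some p0 => if xy.1 > p0 then xy.1 else p0
        (if p + xy.2 > st.1 then p + xy.2 else st.1, some p))
      ((0 : Int), (none : Option Int))
    = ((bsums lis (k + 1)).foldl max 0, some (prefmax lis k)) := by
  induction k with
  | zero =>
    simp only [List.range_succ, List.range_zero, List.nil_append, List.map_cons, List.map_nil,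
      List.foldl_cons, List.foldl_nil, bsums, prefmax, gI]
    simp [if_gt_eq_max]
  | succ k ih =>
    rw [List.range_succ, List.map_append, List.foldl_append, ih]
    simp only [List.map_cons, List.map_nil, List.foldl_cons, List.foldl_nil]
    have hp : prefmax lis (k + 1) = max (prefmax lis k) (lis.getD (k + 1) 0) := by
      simp [prefmax, gI]
    have hcast : ((k : Int) + 1 + 2).toNat = k + 1 + 2 := by omega
    have hb : bsums lis (k + 1 + 1) = bsums lis (k + 1) ++
        [prefmax lis (k + 1) + lis.getD (k + 1 + 2) 0] := by
      simp [bsums, List.range_succ, gI, hcast]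
    rw [hb, List.foldl_append, List.foldl_cons, List.foldl_nil]
    simp only [if_gt_eq_max, hp]

theorem B_eq (len_list : Int) (lis : List Int) :
    solution_alt len_list lis = (bsums lis ((effN len_list lis).toNat - 2)).foldl max 0 := by
  simp only [solution_alt]
  have hL : (0 : Int) ≤ (lis.length : Int) := by positivity
  set n : Int := max (min len_list (lis.length : Int)) 0 with hndef
  have hn0 : (0 : Int) ≤ n := le_max_right _ _
  have heff : effN len_list lis = n := rfl
  set m : ℕ := n.toNat with hmdef
  have hnm : n = (m : Int) := (Int.toNat_of_nonneg hn0).symm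
  have hmlen : m ≤ lis.length := by omega
  have hslice2 : PySem.List.slice lis (some 2) (some n) = (lis.drop 2).take (m - 2) := by
    rw [PySem.List.slice_toNat lis (by omega) hn0]
    rfl
  have hpairs : (PySem.List.slice lis none (some (n - 2))).zip
      (PySem.List.slice lis (some 2) (some n)) =
      (List.range (m - 2)).map (fun t => (lis.getD t 0, lis.getD (t + 2) 0)) := by
    by_cases hm2 : 2 ≤ m
    · have hslice1 : PySem.List.slice lis none (some (n - 2)) = lis.take (m - 2) := by
        rw [PySem.List.slice_to lis (by omega)]
        congr 1
        omega
      rw [hslice1, hslice2]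
      apply List.ext_getElem
      · simp; omega
      · intro t h1 h2
        have ht : t < m - 2 := by simpa using h2
        have htl : t < lis.length := by omega
        have htl2 : t + 2 < lis.length := by omega
        have hc : 2 + t = t + 2 := by omega
        simp only [List.getElem_zip, List.getElem_take, List.getElem_drop, List.getElem_map,
          List.getElem_range, hc]
        rw [List.getD_eq_getElem lis 0 htl, List.getD_eq_getElem lis 0 htl2]
    · have hm0 : m - 2 = 0 := by omega
      rw [hslice2, hm0]
      simp
  rw [hpairs]
  rcases Nat.eq_zero_or_eq_succ_pred (m - 2) with h0 | hs
  · rw [heff, ← hmdef, h0]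
    simp [bsums]
  · rw [heff, ← hmdef, hs, bloop]

-- ---- joining the two orders ----

theorem gI_le_prefmax (lis : List Int) (s t : ℕ) (h : s ≤ t) : gI lis s ≤ prefmax lis t := by
  induction t with
  | zero =>
    have : s = 0 := Nat.le_zero.mp h
    subst this; simp [prefmax]
  | succ t ih =>
    by_cases hs : s ≤ t
    · exact le_trans (ih hs) (le_max_left _ _)
    · have hse : s = t + 1 := by omega
      subst hse
      exact le_max_right _ _

theorem prefmax_mem (lis : List Int) (t : ℕ) : ∃ s ≤ t, prefmax lis t = gI lis s := by
  induction t with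
  | zero => exact ⟨0, le_rfl, rfl⟩
  | succ t ih =>
    rcases ih with ⟨s, hs, he⟩
    by_cases h : gI lis (↑(t + 1)) ≤ prefmax lis t
    · refine ⟨s, le_trans hs (Nat.le_succ _), ?_⟩
      show max (prefmax lis t) (gI lis (↑(t + 1))) = gI lis ↑s
      rw [max_eq_left h, he]
    · refine ⟨t + 1, le_rfl, ?_⟩
      show max (prefmax lis t) (gI lis (↑(t + 1))) = gI lis ↑(t + 1)
      rw [max_eq_right (le_of_not_ge h)]

theorem mem_allL (lis : List Int) (N x : Int) :
    x ∈ allL lis N ↔ ∃ i j : Int, 0 ≤ i ∧ i + 2 ≤ j ∧ j < N ∧ x = gI lis i + gI lis j := by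
  simp only [allL, rowL, List.mem_flatMap, List.mem_map, PySem.List.mem_pyRange_one]
  constructor
  · rintro ⟨i, ⟨hi0, _⟩, j, ⟨hij, hjN⟩, he⟩
    exact ⟨i, j, hi0, hij, hjN, he.symm⟩
  · rintro ⟨i, j, hi0, hij, hjN, he⟩
    exact ⟨i, ⟨hi0, by omega⟩, j, ⟨hij, hjN⟩, he.symm⟩

theorem folds_eq (lis : List Int) (N : Int) (hN : 0 ≤ N) :
    (allL lis N).foldl max 0 = (bsums lis (N.toNat - 2)).foldl max 0 := by
  set m : ℕ := N.toNat with hmdef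
  have hNm : N = (m : Int) := by omega
  apply le_antisymm
  · refine foldl_max_le _ _ _ (le_foldl_max _ _) ?_
    intro x hx
    rw [mem_allL] at hx
    obtain ⟨i, j, hi0, hij, hjN, he⟩ := hx
    set t : ℕ := j.toNat - 2 with htdef
    have htm : t < m - 2 := by omega
    have hjt : j = ((t + 2 : ℕ) : Int) := by omega
    have h1 : gI lis i ≤ prefmax lis t := by
      rw [show i = ((i.toNat : ℕ) : Int) by omega]
      exact gI_le_prefmax lis i.toNat t (by omega)
    have hel : prefmax lis t + gI lis ((t + 2 : ℕ) : Int) ∈ bsums lis (m - 2) := by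
      simp only [bsums, List.mem_map, List.mem_range]
      exact ⟨t, htm, by push_cast; ring_nf⟩
    calc x = gI lis i + gI lis j := he
      _ ≤ prefmax lis t + gI lis j := by omega
      _ = prefmax lis t + gI lis ((t + 2 : ℕ) : Int) := by rw [← hjt]
      _ ≤ _ := mem_le_foldl_max _ _ _ hel
  · refine foldl_max_le _ _ _ (le_foldl_max _ _) ?_
    intro x hx
    simp only [bsums, List.mem_map, List.mem_range] at hx
    obtain ⟨t, htm, he⟩ := hx
    obtain ⟨s, hs, hps⟩ := prefmax_mem lis t
    have hmem : x ∈ allL lis N := by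
      rw [mem_allL]
      refine ⟨(s : Int), ((t + 2 : ℕ) : Int), by positivity, by push_cast; omega,
        by rw [hNm]; push_cast; omega, ?_⟩
      rw [← hps, ← he]
      push_cast
      ring_nf
    exact mem_le_foldl_max _ _ _ hmem

-- ===== VERDICT (by name: the statement is the Claim_ definition above) =====
theorem solution_spec : Claim_equal_solution := by
  intro len_list lis _
  unfold Spec_solution
  rw [A_eq, B_eq, folds_eq]
  · simp [effN]
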